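-- pv_equiv track=rewrite | github.com/FaisalAhmed21/Block-Puzzle-Game | Tile-Block-Puzzle-Game.py | check_obstacle_collision
-- ===== SOURCE A (Python) =====
-- def check_obstacle_collision(block, pos, obstacle_x, obstacle_y):
--     """Check if block collides with obstacle"""
--     for y, row in enumerate(block):
--         for x, cell in enumerate(row):
--             if cell:
--                 grid_x = pos[0] + x
--                 grid_y = pos[1] + y
--                 if grid_x == obstacle_x and grid_y == obstacle_y:
--                     return True
--     return False
-- ===== SOURCE B (Python) =====
-- def check_obstacle_collision(block, pos, obstacle_x, obstacle_y):
--     """Check if block collides with obstacle"""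
--     y = obstacle_y - pos[1]
--     x = obstacle_x - pos[0]
--     if 0 <= y < len(block):
--         row = block[y]
--         if 0 <= x < len(row):
--             return bool(row[x])
--     return False
-- ===== Notes on version B (the rewrite author's own statement) =====
-- stated objective: faster
-- what changed: Instead of scanning every cell of the block, B computes the obstacle's local offset (obstacle - pos), bounds-checks it and tests that single cell directly.
-- outside the precondition, e.g. on check_obstacle_collision([[0]], (), 0, 0): A returns False, B raises IndexError
import Mathlib
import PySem

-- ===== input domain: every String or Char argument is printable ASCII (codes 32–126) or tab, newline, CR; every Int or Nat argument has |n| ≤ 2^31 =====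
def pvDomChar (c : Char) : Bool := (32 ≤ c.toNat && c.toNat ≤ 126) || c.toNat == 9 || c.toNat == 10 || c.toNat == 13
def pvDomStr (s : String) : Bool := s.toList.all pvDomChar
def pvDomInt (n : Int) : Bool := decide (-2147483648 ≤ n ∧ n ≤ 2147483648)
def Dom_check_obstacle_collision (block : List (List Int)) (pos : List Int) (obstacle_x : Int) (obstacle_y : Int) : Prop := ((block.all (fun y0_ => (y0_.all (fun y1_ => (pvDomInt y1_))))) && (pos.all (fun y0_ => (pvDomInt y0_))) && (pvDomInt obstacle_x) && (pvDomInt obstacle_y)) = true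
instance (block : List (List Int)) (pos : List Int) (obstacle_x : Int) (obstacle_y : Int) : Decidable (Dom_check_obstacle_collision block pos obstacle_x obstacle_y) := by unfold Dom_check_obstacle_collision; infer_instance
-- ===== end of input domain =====

-- B replaces A's scan of every block cell by directly testing the single cell at the
-- obstacle's local offset (bounds-checked); objective: faster (O(1) vs O(n*m)).

-- ===== PORT A =====
-- inner 'for x, cell in enumerate(row)' loop; returns false where Python A raises IndexError
-- on pos (unreachable under Pre_)
def pvCoCells (pos : List Int) (ox oy y x : Int) : List Int → Bool
  | [] => false
  | cell :: rest =>
    if cell ≠ 0 then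
      match PySem.List.pyGet? pos 0, PySem.List.pyGet? pos 1 with
      | some p0, some p1 =>
        if p0 + x = ox ∧ p1 + y = oy then true else pvCoCells pos ox oy y (x + 1) rest
      | _, _ => false
    else pvCoCells pos ox oy y (x + 1) rest

-- outer 'for y, row in enumerate(block)' loop
def pvCoRows (pos : List Int) (ox oy y : Int) : List (List Int) → Bool
  | [] => false
  | row :: rest =>
    if pvCoCells pos ox oy y 0 row then true else pvCoRows pos ox oy (y + 1) rest

def check_obstacle_collision (block : List (List Int)) (pos : List Int) (obstacle_x : Int) (obstacle_y : Int) : Bool :=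
  pvCoRows pos obstacle_x obstacle_y 0 block

-- ===== PORT B =====
def check_obstacle_collision_alt (block : List (List Int)) (pos : List Int) (obstacle_x : Int) (obstacle_y : Int) : Bool :=
  let y := obstacle_y - (PySem.List.pyGet? pos 1).getD 0
  let x := obstacle_x - (PySem.List.pyGet? pos 0).getD 0
  if 0 ≤ y ∧ y < (block.length : Int) then
    let row := (PySem.List.pyGet? block y).getD []
    if 0 ≤ x ∧ x < (row.length : Int) then
      decide ((PySem.List.pyGet? row x).getD 0 ≠ 0)
    else false
  else false

-- ===== PRECONDITION & SPEC =====
-- Pre_ excludes pos with fewer than two coordinates: there Python A raises IndexError as soon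
-- as any cell is nonzero, and its False on an all-zero block is an accident of never reading
-- pos; B reads pos[0]/pos[1] up front and raises on all such inputs.
def Pre_check_obstacle_collision (block : List (List Int)) (pos : List Int) (obstacle_x : Int) (obstacle_y : Int) : Prop := 2 ≤ pos.length
instance (block : List (List Int)) (pos : List Int) (obstacle_x : Int) (obstacle_y : Int) : Decidable (Pre_check_obstacle_collision block pos obstacle_x obstacle_y) := by unfold Pre_check_obstacle_collision; infer_instance
def pvWitness_check_obstacle_collision : List (List Int) × List Int × Int × Int := ([[0, 1], [1, 0]], [2, 3], 3, 3)

def Spec_check_obstacle_collision (block : List (List Int)) (pos : List Int) (obstacle_x : Int) (obstacle_y : Int) (out : Bool) : Prop := out = check_obstacle_collision_alt block pos obstacle_x obstacle_y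
instance (block : List (List Int)) (pos : List Int) (obstacle_x : Int) (obstacle_y : Int) (out : Bool) : Decidable (Spec_check_obstacle_collision block pos obstacle_x obstacle_y out) := by unfold Spec_check_obstacle_collision; infer_instance

-- ===== CLAIM (what is proved, stated in full; the proofs are below) =====
def Claim_equal_check_obstacle_collision : Prop := ∀ (block : List (List Int)) (pos : List Int) (obstacle_x : Int) (obstacle_y : Int), Dom_check_obstacle_collision block pos obstacle_x obstacle_y → Pre_check_obstacle_collision block pos obstacle_x obstacle_y → Spec_check_obstacle_collision block pos obstacle_x obstacle_y (check_obstacle_collision block pos obstacle_x obstacle_y)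

-- ===== LEMMAS AND PROOFS =====

lemma pvPyGet?_cons_pos {a : Type} (c : a) (rest : List a) (k : Int) (h : 0 < k) :
    PySem.List.pyGet? (c :: rest) k = PySem.List.pyGet? rest (k - 1) := by
  obtain ⟨n, hn⟩ := Int.eq_ofNat_of_zero_le (show (0:Int) ≤ k - 1 by omega)
  have hk : k = (n : Int) + 1 := by omega
  rw [hk, PySem.List.pyGet?_cons_succ]
  congr 1
  omega

-- B's inner test, as a function of the row-local offset k
def pvHitRow (row : List Int) (k : Int) : Bool :=
  if 0 ≤ k ∧ k < (row.length : Int) then decide ((PySem.List.pyGet? row k).getD 0 ≠ 0) else false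

lemma pvHitRow_neg (row : List Int) (k : Int) (h : k < 0) : pvHitRow row k = false := by
  unfold pvHitRow
  rw [if_neg (show ¬(0 ≤ k ∧ k < (row.length : Int)) from by omega)]

lemma pvHitRow_cons (c : Int) (rest : List Int) (k : Int) :
    pvHitRow (c :: rest) k = if k = 0 then decide (c ≠ 0) else pvHitRow rest (k - 1) := by
  unfold pvHitRow
  by_cases h0 : k = 0
  · subst h0
    rw [if_pos (show (0:Int) ≤ 0 ∧ (0:Int) < ((c :: rest).length : Int) from ⟨le_refl 0, by simp⟩),
        if_pos rfl, PySem.List.pyGet?_zero_cons]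
    simp
  · rw [if_neg h0]
    by_cases h1 : 0 < k
    · rw [pvPyGet?_cons_pos c rest k h1]
      simp only [List.length_cons, Nat.cast_add, Nat.cast_one]
      split_ifs <;> first | rfl | omega
    · split_ifs <;> first | rfl | omega

lemma pvCoCells_eq (pos : List Int) (ox oy y : Int) (p0 p1 : Int)
    (hp0 : PySem.List.pyGet? pos 0 = some p0) (hp1 : PySem.List.pyGet? pos 1 = some p1) :
    ∀ (cells : List Int) (x : Int),
      pvCoCells pos ox oy y x cells = (decide (p1 + y = oy) && pvHitRow cells (ox - p0 - x))
  | [], x => by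
    unfold pvCoCells pvHitRow
    rw [if_neg (show ¬((0:Int) ≤ ox - p0 - x ∧ ox - p0 - x < ((([]:List Int)).length : Int)) from by
      simp)]
    simp
  | cell :: rest, x => by
    rw [pvCoCells, hp0, hp1, pvCoCells_eq pos ox oy y p0 p1 hp0 hp1 rest (x + 1), pvHitRow_cons,
        show ox - p0 - x - 1 = ox - p0 - (x + 1) from by omega]
    dsimp only
    by_cases hc : cell = 0
    · rw [if_neg (show ¬(cell ≠ 0) from by simp [hc])]
      by_cases hk : ox - p0 - x = 0
      · rw [if_pos hk, show ox - p0 - (x + 1) = -1 from by omega,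
            pvHitRow_neg rest (-1) (by omega)]
        simp [hc]
      · rw [if_neg hk]
    · rw [if_pos (show cell ≠ 0 from hc)]
      by_cases hy : p1 + y = oy
      · by_cases hk : ox - p0 - x = 0
        · rw [if_pos (show p0 + x = ox ∧ p1 + y = oy from ⟨by omega, hy⟩), if_pos hk]
          simp [hy, hc]
        · rw [if_neg (show ¬(p0 + x = ox ∧ p1 + y = oy) from fun hh => hk (by omega)), if_neg hk]
      · rw [if_neg (show ¬(p0 + x = ox ∧ p1 + y = oy) from fun hh => hy hh.2)]
        simp [hy]

lemma pvCoRows_eq (pos : List Int) (ox oy : Int) (p0 p1 : Int)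
    (hp0 : PySem.List.pyGet? pos 0 = some p0) (hp1 : PySem.List.pyGet? pos 1 = some p1) :
    ∀ (rows : List (List Int)) (y : Int),
      pvCoRows pos ox oy y rows =
        (if 0 ≤ oy - p1 - y ∧ oy - p1 - y < (rows.length : Int) then
          pvHitRow ((PySem.List.pyGet? rows (oy - p1 - y)).getD []) (ox - p0) else false)
  | [], y => by
    unfold pvCoRows
    rw [if_neg (show ¬((0:Int) ≤ oy - p1 - y ∧ oy - p1 - y < ((([]:List (List Int))).length : Int))
      from by simp)]
  | row :: rest, y => by
    rw [pvCoRows, pvCoCells_eq pos ox oy y p0 p1 hp0 hp1 row 0,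
        pvCoRows_eq pos ox oy p0 p1 hp0 hp1 rest (y + 1), sub_zero]
    by_cases hy : p1 + y = oy
    · have hj : oy - p1 - y = 0 := by omega
      rw [show oy - p1 - (y + 1) = -1 from by omega,
          if_neg (show ¬((0:Int) ≤ -1 ∧ (-1:Int) < (rest.length : Int)) from by omega),
          hj,
          if_pos (show (0:Int) ≤ 0 ∧ (0:Int) < ((row :: rest).length : Int) from
            ⟨le_refl 0, by simp⟩),
          PySem.List.pyGet?_zero_cons]
      simp [hy]
    · have hyD : decide (p1 + y = oy) = false := by simp [hy]
      rw [hyD, Bool.false_and, if_neg (show ¬(false = true) from by simp),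
          show oy - p1 - (y + 1) = oy - p1 - y - 1 from by omega]
      by_cases hjp : 0 < oy - p1 - y
      · rw [pvPyGet?_cons_pos row rest _ hjp]
        simp only [List.length_cons, Nat.cast_add, Nat.cast_one]
        split_ifs <;> first | rfl | omega
      · have hjn : oy - p1 - y < 0 := by omega
        split_ifs <;> first | rfl | omega

lemma pvPreGets (pos : List Int) (h : 2 ≤ pos.length) :
    PySem.List.pyGet? pos 0 = some ((PySem.List.pyGet? pos 0).getD 0) ∧
    PySem.List.pyGet? pos 1 = some ((PySem.List.pyGet? pos 1).getD 0) := by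
  have h0 := PySem.List.pyGet?_eq_some_getElem pos (i := 0) (by omega) (by exact_mod_cast by omega)
  have h1 := PySem.List.pyGet?_eq_some_getElem pos (i := 1) (by omega) (by exact_mod_cast by omega)
  rw [h0, h1]
  simp

-- ===== VERDICT (by name: the statement is the Claim_ definition above) =====
theorem check_obstacle_collision_spec : Claim_equal_check_obstacle_collision := by
  intro block pos ox oy _ hpre
  unfold Spec_check_obstacle_collision check_obstacle_collision check_obstacle_collision_alt
  obtain ⟨hp0, hp1⟩ := pvPreGets pos hpre
  rw [pvCoRows_eq pos ox oy _ _ hp0 hp1 block 0, sub_zero]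
  simp only [pvHitRow]
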